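-- pv_equiv track=rewrite | github.com/n1ssinnnn/Thanva | server/src/function.py | merge_omr_ocr_field
-- ===== SOURCE A (Python) =====
-- def merge_omr_ocr_field(omr: str, ocr: str) -> str:
--     result = ""
--     for o, c in zip(omr, ocr):
--         if c == "?":
--             continue
--         else:
--             result += c
--     if len(omr) > len(ocr):
--         result += omr[len(ocr):]
--     return result
-- ===== SOURCE B (Python) =====
-- def merge_omr_ocr_field(omr: str, ocr: str) -> str:
--     return ocr[:len(omr)].replace("?", "") + omr[len(ocr):]
-- ===== Notes on version B (the rewrite author's own statement) =====
-- stated objective: idiomatic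
-- what changed: The explicit zip loop with a character accumulator and the conditional tail append are replaced by a single expression: slice the OCR prefix that pairs with OMR, delete its '?' characters with str.replace, and concatenate the (possibly empty) OMR tail slice.
import Mathlib
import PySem

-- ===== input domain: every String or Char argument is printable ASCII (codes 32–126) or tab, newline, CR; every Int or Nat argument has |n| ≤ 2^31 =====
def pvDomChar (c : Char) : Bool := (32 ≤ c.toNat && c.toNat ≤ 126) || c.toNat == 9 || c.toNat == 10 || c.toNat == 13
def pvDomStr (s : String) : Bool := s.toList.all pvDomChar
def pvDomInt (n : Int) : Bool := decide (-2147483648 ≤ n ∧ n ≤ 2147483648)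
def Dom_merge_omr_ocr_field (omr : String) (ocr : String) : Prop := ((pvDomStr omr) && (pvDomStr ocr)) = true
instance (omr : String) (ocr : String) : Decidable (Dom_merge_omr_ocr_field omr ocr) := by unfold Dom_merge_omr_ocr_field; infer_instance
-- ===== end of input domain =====

-- B replaces A's zip loop by one expression: slice the OCR prefix paired with OMR,
-- delete its '?' characters with str.replace, and append the OMR tail slice (idiomatic, same cost).


-- ===== PORT A =====
def merge_omr_ocr_field (omr : String) (ocr : String) : String :=
  -- result = ""; for o, c in zip(omr, ocr): if c == "?": continue else result += c
  let result : List Char :=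
    (omr.toList.zip ocr.toList).foldl
      (fun acc oc => if oc.2 = '?' then acc else acc ++ [oc.2]) []
  -- if len(omr) > len(ocr): result += omr[len(ocr):]
  let result : List Char :=
    if omr.length > ocr.length then
      result ++ PySem.Chars.slice omr.toList (some (ocr.length : Int)) none
    else result
  String.ofList result

-- ===== PORT B =====
def merge_omr_ocr_field_alt (omr : String) (ocr : String) : String :=
  PySem.Str.replace (PySem.Str.slice ocr none (some (omr.length : Int))) "?" ""
    ++ PySem.Str.slice omr (some (ocr.length : Int)) none

-- ===== PRECONDITION & SPEC =====
def Spec_merge_omr_ocr_field (omr : String) (ocr : String) (out : String) : Prop := out = merge_omr_ocr_field_alt omr ocr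
instance (omr : String) (ocr : String) (out : String) : Decidable (Spec_merge_omr_ocr_field omr ocr out) := by unfold Spec_merge_omr_ocr_field; infer_instance

-- ===== CLAIM (what is proved, stated in full; the proofs are below) =====
def Claim_equal_merge_omr_ocr_field : Prop := ∀ (omr : String) (ocr : String), Dom_merge_omr_ocr_field omr ocr → Spec_merge_omr_ocr_field omr ocr (merge_omr_ocr_field omr ocr)

-- ===== LEMMAS AND PROOFS =====

-- replace.go with old = "?" and new = "" filters out '?' (enough fuel)
theorem replace_go_filter (fuel : Nat) (l acc : List Char) (h : l.length ≤ fuel) :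
    PySem.Chars.replace.go ['?'] [] fuel l acc = acc.reverse ++ l.filter (· ≠ '?') := by
  induction fuel generalizing l acc with
  | zero =>
    have : l = [] := List.length_eq_zero_iff.mp (Nat.le_zero.mp h)
    subst this; simp [PySem.Chars.replace.go]
  | succ n ih =>
    cases l with
    | nil => simp [PySem.Chars.replace.go]
    | cons c t =>
      simp only [PySem.Chars.replace.go]
      by_cases hc : c = '?'
      · subst hc
        rw [if_pos (by simp [List.isPrefixOf])]
        simp only [show List.drop ['?'].length ('?' :: t) = t from rfl,
          List.reverse_nil, List.nil_append]
        rw [ih t acc (by simpa using h)]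
        simp
      · rw [if_neg (by simp [List.isPrefixOf]; exact fun e => hc e.symm)]
        rw [ih t (c :: acc) (by simpa using h)]
        simp [hc]

theorem replace_q_filter (l : List Char) :
    PySem.Chars.replace l ['?'] [] = l.filter (· ≠ '?') := by
  rw [PySem.Chars.replace, if_neg (by decide)]
  simpa using replace_go_filter l.length l [] le_rfl

theorem map_snd_zip_eq_take (l1 l2 : List Char) :
    (l1.zip l2).map Prod.snd = l2.take l1.length := by
  induction l1 generalizing l2 with
  | nil => simp
  | cons a t ih =>
    cases l2 with
    | nil => simp
    | cons b u => simp [ih]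

theorem loop_eq_filter (omr ocr : String) :
    (omr.toList.zip ocr.toList).foldl
      (fun acc oc => if oc.2 = '?' then acc else acc ++ [oc.2]) ([] : List Char)
      = (ocr.toList.take omr.length).filter (· ≠ '?') := by
  have hfun : (fun (acc : List Char) (oc : Char × Char) => if oc.2 = '?' then acc else acc ++ [oc.2])
      = (fun acc oc => if (fun oc : Char × Char => decide (oc.2 ≠ '?')) oc = true
          then acc ++ [(fun oc : Char × Char => oc.2) oc] else acc) := by
    funext acc oc
    by_cases h : oc.2 = '?' <;> simp [h]
  rw [hfun, PySem.List.foldl_append_if]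
  rw [show (fun oc : Char × Char => decide (oc.2 ≠ '?'))
        = ((fun c : Char => decide (c ≠ '?')) ∘ Prod.snd) from rfl]
  rw [← List.filter_map, map_snd_zip_eq_take]
  simp [String.length_toList]

-- ===== VERDICT (by name: the statement is the Claim_ definition above) =====
theorem merge_omr_ocr_field_spec : Claim_equal_merge_omr_ocr_field := by
  intro omr ocr _
  unfold Spec_merge_omr_ocr_field merge_omr_ocr_field merge_omr_ocr_field_alt
  rw [← String.toList_inj]
  simp only [String.toList_ofList, String.toList_append, PySem.Str.toList_replace,
    PySem.Str.toList_slice, loop_eq_filter]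
  rw [show ("?" : String).toList = ['?'] from rfl, show ("" : String).toList = [] from rfl,
    replace_q_filter]
  have hocr : PySem.Chars.slice ocr.toList none (some (omr.length : Int))
      = ocr.toList.take omr.length := by
    simpa using PySem.List.slice_to_natCast ocr.toList omr.length
  have homr : PySem.Chars.slice omr.toList (some (ocr.length : Int)) none
      = omr.toList.drop ocr.length := by
    simpa using PySem.List.slice_from_natCast omr.toList ocr.length
  rw [hocr, homr]
  by_cases h : omr.length > ocr.length
  · simp [h]
  · rw [if_neg h]
    have : omr.toList.drop ocr.length = [] := by
      apply List.drop_eq_nil_of_le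
      simpa [String.length_toList] using Nat.le_of_not_lt h
    simp [this]
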